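-- pv_equiv track=rewrite | github.com/M0hamedIbrahim1/-Data-Structure-Algorithms | Two Pointers/Problems/2576. Find the Maximum Number of Marked Indices.py | maxNumOfMarkedIndices
-- ===== SOURCE A (Python) =====
-- from typing import List
--
-- def maxNumOfMarkedIndices(nums: List[int]) -> int:
--     nums.sort()
--     n = len(nums)
--     j = n-1
--
--     ans = 0
--     for i in range((n//2) -1 , -1 , -1):
--         if nums[i]*2 <= nums[j]:
--             ans+=2
--             j-=1
--     return ans
-- ===== SOURCE B (Python) =====
-- def maxNumOfMarkedIndices(nums):
--     # Binary search on the number of pairs m: m pairs are feasible iff the m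
--     # smallest values pair with the m largest (2*nums[i] <= nums[n-m+i]).
--     nums.sort()
--     n = len(nums)
--     lo, hi = 0, n // 2
--     while lo < hi:
--         mid = (lo + hi + 1) // 2
--         if all(2 * nums[i] <= nums[n - mid + i] for i in range(mid)):
--             lo = mid
--         else:
--             hi = mid - 1
--     return 2 * lo
-- ===== Notes on version B (the rewrite author's own statement) =====
-- stated objective: alternative
-- what changed: Replaces A's single backward moving-pointer greedy sweep with a binary search over the number of pairs m, checking feasibility of m pairs (2*nums[i] <= nums[n-m+i] for all i < m) with an O(n) window scan per probe.
import Mathlib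
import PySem

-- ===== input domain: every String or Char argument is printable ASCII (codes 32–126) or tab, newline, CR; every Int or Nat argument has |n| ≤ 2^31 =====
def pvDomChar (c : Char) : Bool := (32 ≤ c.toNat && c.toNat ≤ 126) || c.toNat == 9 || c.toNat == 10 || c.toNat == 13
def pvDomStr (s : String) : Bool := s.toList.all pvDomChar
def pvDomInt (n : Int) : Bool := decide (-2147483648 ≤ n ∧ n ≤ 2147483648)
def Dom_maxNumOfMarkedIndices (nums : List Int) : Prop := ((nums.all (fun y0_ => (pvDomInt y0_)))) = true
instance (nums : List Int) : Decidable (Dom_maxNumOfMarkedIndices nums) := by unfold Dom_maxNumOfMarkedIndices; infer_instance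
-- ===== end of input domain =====

-- B replaces A's backward moving-pointer greedy by a binary search on the number of pairs m
-- (m pairs are feasible iff 2*a[i] <= a[n-m+i] for all i < m); Python A sorts `nums` in place
-- and so does B — the theorems below are about the return value.

-- ===== PORT A =====
def maxNumOfMarkedIndices (nums : List Int) : Int :=
  -- nums.sort(); n = len(nums); j = n-1; ans = 0; for i in range(n//2-1, -1, -1): …
  let a := PySem.List.sorted nums (fun x => x) false
  let n : Int := PySem.List.len a
  let st := (PySem.List.pyRange (PySem.Int.floordiv n 2 - 1) (-1) (-1)).foldl
    (fun (st : Int × Int) (i : Int) =>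
      -- nums[i] / nums[j]: both indices are always in range, so the getD default is never used
      if PySem.List.pyGetD a i 0 * 2 ≤ PySem.List.pyGetD a st.1 0
      then (st.1 - 1, st.2 + 2) else st)
    (n - 1, 0)
  st.2

-- ===== PORT B =====
-- all(2 * nums[i] <= nums[n - mid + i] for i in range(mid))
def pvAltFeasible (a : List Int) (n m : Int) : Bool :=
  (PySem.List.pyRange 0 m 1).all
    (fun i => 2 * PySem.List.pyGetD a i 0 ≤ PySem.List.pyGetD a (n - m + i) 0)

-- while lo < hi: mid = (lo+hi+1)//2; lo = mid if feasible else hi = mid-1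
def pvAltSearch (a : List Int) (n lo hi : Int) : Int :=
  if _h : lo < hi then
    let mid := PySem.Int.floordiv (lo + hi + 1) 2
    if pvAltFeasible a n mid then pvAltSearch a n mid hi else pvAltSearch a n lo (mid - 1)
  else lo
termination_by (hi - lo).toNat
decreasing_by
  · have h2 : PySem.Int.floordiv (lo + hi + 1) 2 = (lo + hi + 1) / 2 :=
      PySem.Int.floordiv_eq_ediv_of_pos (by norm_num)
    omega
  · have h2 : PySem.Int.floordiv (lo + hi + 1) 2 = (lo + hi + 1) / 2 :=
      PySem.Int.floordiv_eq_ediv_of_pos (by norm_num)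
    omega

def maxNumOfMarkedIndices_alt (nums : List Int) : Int :=
  let a := PySem.List.sorted nums (fun x => x) false
  let n : Int := PySem.List.len a
  2 * pvAltSearch a n 0 (PySem.Int.floordiv n 2)

-- ===== PRECONDITION & SPEC =====
def Spec_maxNumOfMarkedIndices (nums : List Int) (out : Int) : Prop := out = maxNumOfMarkedIndices_alt nums
instance (nums : List Int) (out : Int) : Decidable (Spec_maxNumOfMarkedIndices nums out) := by unfold Spec_maxNumOfMarkedIndices; infer_instance

-- ===== CLAIM (what is proved, stated in full; the proofs are below) =====
def Claim_equal_maxNumOfMarkedIndices : Prop := ∀ (nums : List Int), Dom_maxNumOfMarkedIndices nums → Spec_maxNumOfMarkedIndices nums (maxNumOfMarkedIndices nums)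

-- ===== LEMMAS AND PROOFS =====

-- a[k] with default (every use below is at an in-range index)
def pvF (a : List Int) (k : Nat) : Int := a.getD k 0

-- "m pairs fit under top pointer j": 2*a[s] <= a[j+1+s-m] for all s < m
def pvFeas (a : List Int) (j m : Nat) : Prop := ∀ s, s < m → 2 * pvF a s ≤ pvF a (j + 1 + s - m)

-- A's greedy, abstracted: process small indices i-1 … 0 against top pointer j
def pvGreedy (a : List Int) : Nat → Nat → Nat
  | 0, _ => 0
  | i + 1, j => if pvF a i * 2 ≤ pvF a j then pvGreedy a i (j - 1) + 1 else pvGreedy a i j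

-- the largest m ≤ i with pvFeas a j m
def pvMaxFeas (a : List Int) (j : Nat) : Nat → Nat
  | 0 => 0
  | i + 1 => if ∀ s, s < i + 1 → 2 * pvF a s ≤ pvF a (j + 1 + s - (i + 1)) then i + 1
             else pvMaxFeas a j i

theorem pvMaxFeas_le (a : List Int) (j i : Nat) : pvMaxFeas a j i ≤ i := by
  induction i with
  | zero => simp [pvMaxFeas]
  | succ i ih => unfold pvMaxFeas; split <;> omega

theorem pvMaxFeas_feas (a : List Int) (j i : Nat) : pvFeas a j (pvMaxFeas a j i) := by
  induction i with
  | zero => intro s hs; simp [pvMaxFeas] at hs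
  | succ i ih =>
    unfold pvMaxFeas; split
    · next h => exact h
    · exact ih

theorem le_pvMaxFeas (a : List Int) (j i m : Nat) (hm : m ≤ i) (hf : pvFeas a j m) :
    m ≤ pvMaxFeas a j i := by
  induction i with
  | zero => omega
  | succ i ih =>
    unfold pvMaxFeas; split
    · omega
    · next h =>
      have hne : m ≠ i + 1 := by intro he; subst he; exact h hf
      exact ih (by omega)

-- after a failing comparison the largest feasible count is unchanged
theorem pvMaxFeas_succ_nomatch (a : List Int) (i j : Nat) (hij : 2 * (i + 1) ≤ j + 1)
    (hnm : ¬ pvF a i * 2 ≤ pvF a j) : pvMaxFeas a j (i + 1) = pvMaxFeas a j i := by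
  conv_lhs => rw [pvMaxFeas]
  rw [if_neg]
  intro hall
  have h1 := hall i (by omega)
  have heq : j + 1 + i - (i + 1) = j := by omega
  rw [heq] at h1
  exact hnm (by linarith)

-- after a succeeding comparison the largest feasible count grows by exactly one
theorem pvMaxFeas_succ_match (a : List Int)
    (ha : ∀ p q : Nat, p ≤ q → q < a.length → a.getD p 0 ≤ a.getD q 0)
    (i j : Nat) (hij : 2 * (i + 1) ≤ j + 1) (hj : j < a.length)
    (hm : pvF a i * 2 ≤ pvF a j) :
    pvMaxFeas a j (i + 1) = pvMaxFeas a (j - 1) i + 1 := by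
  have hj1 : 1 ≤ j := by omega
  have hin : i < a.length := by omega
  apply Nat.le_antisymm
  · have hfm : pvFeas a j (pvMaxFeas a j (i + 1)) := pvMaxFeas_feas a j (i + 1)
    have hmle : pvMaxFeas a j (i + 1) ≤ i + 1 := pvMaxFeas_le a j (i + 1)
    rcases hk : pvMaxFeas a j (i + 1) with _ | m'
    · omega
    · rw [hk] at hfm hmle
      have hf' : pvFeas a (j - 1) m' := by
        intro s hs
        have h1 := hfm s (by omega)
        have heq : j - 1 + 1 + s - m' = j + 1 + s - (m' + 1) := by omega
        rw [heq]; exact h1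
      have := le_pvMaxFeas a (j - 1) i m' (by omega) hf'
      omega
  · have hf' : pvFeas a (j - 1) (pvMaxFeas a (j - 1) i) := pvMaxFeas_feas a (j - 1) i
    have hle : pvMaxFeas a (j - 1) i ≤ i := pvMaxFeas_le a (j - 1) i
    set m' := pvMaxFeas a (j - 1) i with hm'
    have hfs : pvFeas a j (m' + 1) := by
      intro s hs
      rcases Nat.lt_or_ge s m' with h' | h'
      · have h1 := hf' s h'
        have heq : j + 1 + s - (m' + 1) = j - 1 + 1 + s - m' := by omega
        rw [heq]; exact h1
      · have heq : j + 1 + s - (m' + 1) = j := by omega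
        rw [heq]
        have h2 : pvF a s ≤ pvF a i := ha s i (by omega) hin
        unfold pvF at *
        linarith
    exact le_pvMaxFeas a j (i + 1) (m' + 1) (by omega) hfs

-- KEY LEMMA: A's greedy count equals the largest feasible pair count
theorem pvGreedy_eq_pvMaxFeas (a : List Int)
    (ha : ∀ p q : Nat, p ≤ q → q < a.length → a.getD p 0 ≤ a.getD q 0) :
    ∀ i j, 2 * i ≤ j + 1 → j < a.length → pvGreedy a i j = pvMaxFeas a j i := by
  intro i
  induction i with
  | zero => intro j _ _; rfl
  | succ i ih =>
    intro j hij hj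
    unfold pvGreedy
    split
    · next h =>
      rw [pvMaxFeas_succ_match a ha i j hij hj h, ih (j - 1) (by omega) (by omega)]
    · next h =>
      rw [pvMaxFeas_succ_nomatch a i j hij h]
      exact ih j (by omega) hj

-- A's fold over range(i-1, -1, -1) computes c + 2 * pvGreedy
theorem pvFoldA (a : List Int) : ∀ (i j : Nat) (c : Int), i ≤ j + 1 →
    ((PySem.List.pyRange ((i : Int) - 1) (-1) (-1)).foldl
      (fun (st : Int × Int) (k : Int) =>
        if PySem.List.pyGetD a k 0 * 2 ≤ PySem.List.pyGetD a st.1 0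
        then (st.1 - 1, st.2 + 2) else st)
      ((j : Int), c)).2 = c + 2 * (pvGreedy a i j : Int) := by
  intro i
  induction i with
  | zero =>
    intro j c _
    rw [show ((0 : Nat) : Int) - 1 = -1 by norm_num,
        PySem.List.pyRange_neg_one_eq_nil (le_refl (-1))]
    simp [pvGreedy]
  | succ i ih =>
    intro j c hij
    rw [show ((i + 1 : Nat) : Int) - 1 = (i : Int) by push_cast; ring,
        PySem.List.pyRange_neg_one_cons (by omega)]
    simp only [List.foldl_cons, PySem.List.pyGetD_natCast]
    by_cases hc : pvF a i * 2 ≤ pvF a j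
    · rw [if_pos (by unfold pvF at hc; exact hc)]
      rcases j with _ | j'
      · have hi0 : i = 0 := by omega
        subst hi0
        rw [show ((0 : Nat) : Int) - 1 = -1 by norm_num,
            PySem.List.pyRange_neg_one_eq_nil (le_refl (-1))]
        have : pvGreedy a 1 0 = 1 := by
          rw [pvGreedy]
          rw [if_pos hc]
          rfl
        rw [List.foldl_nil, this]
        norm_num
      · rw [show ((j' + 1 : Nat) : Int) - 1 = ((j' : Nat) : Int) by push_cast; ring]
        rw [ih j' (c + 2) (by omega)]
        have : pvGreedy a (i + 1) (j' + 1) = pvGreedy a i j' + 1 := by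
          rw [pvGreedy]
          rw [if_pos hc]
          norm_num
        rw [this]
        push_cast
        ring
    · rw [if_neg (by unfold pvF at hc; exact hc)]
      rw [ih j c (by omega)]
      have : pvGreedy a (i + 1) j = pvGreedy a i j := by
        rw [pvGreedy]
        rw [if_neg hc]
      rw [this]

theorem pvAltFeasible_iff (a : List Int) (n m : Nat) (hm : m ≤ n) (hn : n = a.length) :
    (pvAltFeasible a (n : Int) (m : Int) = true) ↔ pvFeas a (n - 1) m := by
  unfold pvAltFeasible pvFeas pvF
  rw [PySem.List.pyRange_one]
  simp only [Int.sub_zero, Int.toNat_natCast, List.all_map, List.all_eq_true, List.mem_range,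
    Function.comp_apply, zero_add, decide_eq_true_eq, PySem.List.pyGetD_natCast]
  constructor
  · intro h s hs
    have h1 := h s hs
    rw [show ((n : Int) - (m : Int) + (s : Int)) = ((n - m + s : Nat) : Int) by omega,
        PySem.List.pyGetD_natCast] at h1
    rw [show n - 1 + 1 + s - m = n - m + s by omega]
    exact h1
  · intro h s hs
    have h1 := h s hs
    rw [show n - 1 + 1 + s - m = n - m + s by omega] at h1
    rw [show ((n : Int) - (m : Int) + (s : Int)) = ((n - m + s : Nat) : Int) by omega,
        PySem.List.pyGetD_natCast]
    exact h1

-- feasibility is downward monotone on a sorted list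
theorem pvFeas_mono (a : List Int)
    (ha : ∀ p q : Nat, p ≤ q → q < a.length → a.getD p 0 ≤ a.getD q 0)
    (n m m' : Nat) (hn : n = a.length) (h' : m' ≤ m) (hm : m ≤ n)
    (hf : pvFeas a (n - 1) m) : pvFeas a (n - 1) m' := by
  intro s hs
  have h1 := hf s (by omega)
  have h2 : a.getD (n - 1 + 1 + s - m) 0 ≤ a.getD (n - 1 + 1 + s - m') 0 :=
    ha _ _ (by omega) (by omega)
  unfold pvF at *
  linarith

-- the binary search returns the largest feasible pair count
theorem pvAltSearch_eq (a : List Int)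
    (ha : ∀ p q : Nat, p ≤ q → q < a.length → a.getD p 0 ≤ a.getD q 0)
    (n : Nat) (hn : n = a.length) :
    ∀ d lo hi : Nat, hi - lo = d →
      lo ≤ pvMaxFeas a (n - 1) (n / 2) → pvMaxFeas a (n - 1) (n / 2) ≤ hi → hi ≤ n / 2 →
      pvAltSearch a (n : Int) (lo : Int) (hi : Int) = (pvMaxFeas a (n - 1) (n / 2) : Int) := by
  intro d
  induction d using Nat.strong_induction_on with
  | _ d ih =>
    intro lo hi hd hlo hhi hh
    set K := pvMaxFeas a (n - 1) (n / 2) with hK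
    rcases Nat.lt_or_ge lo hi with hlt | hge
    · rw [pvAltSearch, dif_pos (by exact_mod_cast hlt)]
      have emid : PySem.Int.floordiv ((lo : Int) + (hi : Int) + 1) 2 = (((lo + hi + 1) / 2 : Nat) : Int) := by
        rw [show ((lo : Int) + (hi : Int) + 1) = (((lo + hi + 1 : Nat)) : Int) by push_cast; ring]
        exact_mod_cast PySem.Int.floordiv_natCast (lo + hi + 1) 2
      set midN := (lo + hi + 1) / 2 with hmid
      have hlm : lo < midN := by omega
      have hmh : midN ≤ hi := by omega
      by_cases hfeas : pvFeas a (n - 1) midN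
      · rw [emid, if_pos ((pvAltFeasible_iff a n midN (by omega) hn).mpr hfeas)]
        have hmK : midN ≤ K := le_pvMaxFeas a (n - 1) (n / 2) midN (by omega) hfeas
        exact ih (hi - midN) (by omega) midN hi rfl hmK hhi hh
      · rw [emid, if_neg (by
          intro hc
          exact hfeas ((pvAltFeasible_iff a n midN (by omega) hn).mp hc))]
        have hKm : K ≤ midN - 1 := by
          by_contra hcon
          exact hfeas (pvFeas_mono a ha n K midN hn (by omega)
            (le_trans (pvMaxFeas_le a (n - 1) (n / 2)) (Nat.div_le_self n 2)) (pvMaxFeas_feas a (n - 1) (n / 2)))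
        rw [show (((lo + hi + 1) / 2 : Nat) : Int) - 1 = (((lo + hi + 1) / 2 - 1 : Nat) : Int) by omega]
        exact ih (midN - 1 - lo) (by omega) lo (midN - 1) rfl hlo hKm (by omega)
    · rw [pvAltSearch, dif_neg (by exact_mod_cast Nat.not_lt.mpr hge)]
      have : lo = K := by omega
      exact_mod_cast congrArg (fun x : Nat => (x : Int)) this

theorem maxNumOfMarkedIndices_spec : Claim_equal_maxNumOfMarkedIndices := by
  intro nums _
  unfold Spec_maxNumOfMarkedIndices maxNumOfMarkedIndices maxNumOfMarkedIndices_alt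
  simp only [PySem.List.len_eq]
  set a := PySem.List.sorted nums (fun x => x) false with hA
  have ha : ∀ p q : Nat, p ≤ q → q < a.length → a.getD p 0 ≤ a.getD q 0 := by
    intro p q hpq hq
    rw [List.getD_eq_getElem _ _ (by omega), List.getD_eq_getElem _ _ hq]
    exact PySem.List.key_sorted_getElem_mono nums (fun x => x) hpq (by simpa [hA] using hq)
  rcases Nat.eq_zero_or_pos a.length with h0 | h1
  · have ha0 : a = [] := List.length_eq_zero_iff.mp h0
    rw [ha0]
    rw [show ((List.length ([] : List Int) : Int)) = 0 by simp]
    rw [show PySem.Int.floordiv 0 2 = 0 from by decide]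
    rw [show (0 : Int) - 1 = -1 by norm_num,
        PySem.List.pyRange_neg_one_eq_nil (le_refl (-1)), List.foldl_nil]
    rw [pvAltSearch, dif_neg (lt_irrefl 0)]
    norm_num
  · have e1 : PySem.Int.floordiv ((a.length : Nat) : Int) 2 = ((a.length / 2 : Nat) : Int) := by
      exact_mod_cast PySem.Int.floordiv_natCast a.length 2
    have e2 : ((a.length : Int) - 1) = ((a.length - 1 : Nat) : Int) := by omega
    rw [e1, e2]
    rw [pvFoldA a (a.length / 2) (a.length - 1) 0 (by omega)]
    rw [pvGreedy_eq_pvMaxFeas a ha (a.length / 2) (a.length - 1) (by omega) (by omega)]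
    have hB := pvAltSearch_eq a ha a.length rfl (a.length / 2 - 0) 0 (a.length / 2) rfl
      (Nat.zero_le _) (pvMaxFeas_le a (a.length - 1) (a.length / 2)) (le_refl _)
    simp only [Nat.cast_zero] at hB
    rw [hB]
    ring
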